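-- pv_equiv track=rewrite | github.com/LittlePyx/Pi_zaya | kb/converter/quality_compare.py | _count_display_math_blocks
-- ===== SOURCE A (Python) =====
-- def _count_display_math_blocks(md_text: str) -> int:
--     lines = md_text.splitlines()
--     in_block = False
--     count = 0
--     for raw in lines:
--         stripped = (raw or "").strip()
--         if not stripped:
--             continue
--         if stripped.startswith("$$") and stripped.endswith("$$") and len(stripped) > 4:
--             count += 1
--             continue
--         if stripped == "$$":
--             if in_block:
--                 count += 1
--                 in_block = False
--             else:
--                 in_block = True
--     return count
-- ===== SOURCE B (Python) =====
-- def _count_display_math_blocks(md_text: str) -> int: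
--     stripped_lines = [ln.strip() for ln in md_text.splitlines()]
--     singles = sum(
--         1
--         for s in stripped_lines
--         if s.startswith("$$") and s.endswith("$$") and len(s) > 4
--     )
--     delims = stripped_lines.count("$$")
--     return singles + delims // 2
-- ===== Notes on version B (the rewrite author's own statement) =====
-- stated objective: simpler
-- what changed: Replaces the in_block state machine with a stateless single pass: count single-line display-math blocks and bare delimiter lines, returning singles plus half the delimiter-line count (floor).
import Mathlib
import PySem

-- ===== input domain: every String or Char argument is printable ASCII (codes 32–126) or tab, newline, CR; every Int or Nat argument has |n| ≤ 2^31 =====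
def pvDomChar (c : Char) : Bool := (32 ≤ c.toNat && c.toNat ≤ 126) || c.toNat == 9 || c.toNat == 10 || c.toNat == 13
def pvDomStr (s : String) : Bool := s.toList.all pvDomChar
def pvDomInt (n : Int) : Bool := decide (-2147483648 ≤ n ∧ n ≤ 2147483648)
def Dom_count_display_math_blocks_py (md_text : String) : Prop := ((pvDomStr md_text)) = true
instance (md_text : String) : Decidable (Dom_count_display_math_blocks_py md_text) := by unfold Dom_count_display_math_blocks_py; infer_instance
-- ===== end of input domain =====

-- B drops A's in_block state machine: it counts single-line $$…$$ blocks and bare '$$'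
-- delimiter lines in one stateless pass and returns singles + delims // 2 (simpler).


-- ===== PORT A =====
-- the loop body of A over state (in_block, count)
def pvStepA (st : Bool × Int) (raw : String) : Bool × Int :=
  let stripped := PySem.Str.strip raw
  if stripped = "" then st
  else if (PySem.Str.startswith stripped "$$" && PySem.Str.endswith stripped "$$"
           && decide (4 < PySem.Str.len stripped)) = true then (st.1, st.2 + 1)
  else if stripped = "$$" then
    (if st.1 then (false, st.2 + 1) else (true, st.2))
  else st

def count_display_math_blocks_py (md_text : String) : Int :=
  let lines := PySem.Str.splitlines md_text
  (lines.foldl pvStepA (false, 0)).2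

-- ===== PORT B =====
def pvSingleLine (s : String) : Bool :=
  PySem.Str.startswith s "$$" && PySem.Str.endswith s "$$" && decide (4 < PySem.Str.len s)

def count_display_math_blocks_py_alt (md_text : String) : Int :=
  let stripped_lines := (PySem.Str.splitlines md_text).map PySem.Str.strip
  let singles : Int := (stripped_lines.countP pvSingleLine : Nat)
  let delims : Int := (stripped_lines.count "$$" : Nat)
  singles + PySem.Int.floordiv delims 2

-- ===== PRECONDITION & SPEC =====
def Spec_count_display_math_blocks_py (md_text : String) (out : Int) : Prop := out = count_display_math_blocks_py_alt md_text
instance (md_text : String) (out : Int) : Decidable (Spec_count_display_math_blocks_py md_text out) := by unfold Spec_count_display_math_blocks_py; infer_instance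

-- ===== CLAIM (what is proved, stated in full; the proofs are below) =====
def Claim_equal_count_display_math_blocks_py : Prop := ∀ (md_text : String), Dom_count_display_math_blocks_py md_text → Spec_count_display_math_blocks_py md_text (count_display_math_blocks_py md_text)

-- ===== LEMMAS AND PROOFS =====

-- floor division of a Nat cast by 2 is Nat division
lemma pv_floordiv_two (k : Nat) : PySem.Int.floordiv (k : Int) 2 = ((k / 2 : Nat) : Int) := by
  exact_mod_cast PySem.Int.floordiv_natCast k 2

-- A's loop invariant: the final count is the initial count, plus the single-line
-- blocks, plus every second bare '$$' (an open block contributes one pending '$$').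
lemma pv_loopA (l : List String) (b : Bool) (c : Int) :
    (l.foldl pvStepA (b, c)).2 =
      c + ((l.map PySem.Str.strip).countP pvSingleLine : Nat)
        + ((((l.map PySem.Str.strip).count "$$" + (if b then 1 else 0)) / 2 : Nat) : Int) := by
  induction l generalizing b c with
  | nil => cases b <;> simp
  | cons s t ih =>
    simp only [List.foldl_cons, List.map_cons, List.countP_cons, List.count_cons]
    have hstep : pvStepA (b, c) s =
        (if PySem.Str.strip s = "" then (b, c)
         else if pvSingleLine (PySem.Str.strip s) = true then (b, c + 1)
         else if PySem.Str.strip s = "$$" then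
           (if b then (false, c + 1) else (true, c))
         else (b, c)) := rfl
    by_cases h0 : PySem.Str.strip s = ""
    · have hns : pvSingleLine (PySem.Str.strip s) = false := by rw [h0]; decide
      have hnd : (PySem.Str.strip s == "$$") = false := by rw [h0]; decide
      have hstep' : pvStepA (b, c) s = (b, c) := by rw [hstep, if_pos h0]
      rw [hstep', ih]
      simp [hns, hnd]
    · by_cases h1 : pvSingleLine (PySem.Str.strip s) = true
      · have hnd : (PySem.Str.strip s == "$$") = false := by
          apply beq_eq_false_iff_ne.mpr
          intro h
          rw [h] at h1
          exact absurd h1 (by decide)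
        have hstep' : pvStepA (b, c) s = (b, c + 1) := by
          rw [hstep, if_neg h0, if_pos h1]
        rw [hstep', ih]
        simp only [h1, hnd, Bool.false_eq_true, if_false, if_true]
        push_cast
        omega
      · by_cases h2 : PySem.Str.strip s = "$$"
        · have hns : (PySem.Str.strip s == "$$") = true := beq_iff_eq.mpr h2
          cases b with
          | false =>
            have hstep' : pvStepA (false, c) s = (true, c) := by
              rw [hstep, if_neg h0, if_neg h1, if_pos h2]
              rfl
            rw [hstep', ih]
            simp only [h1, hns, Bool.false_eq_true, if_false, if_true]
            push_cast
            omega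
          | true =>
            have hstep' : pvStepA (true, c) s = (false, c + 1) := by
              rw [hstep, if_neg h0, if_neg h1, if_pos h2]
              rfl
            rw [hstep', ih]
            simp only [h1, hns, Bool.false_eq_true, if_false, if_true]
            push_cast
            omega
        · have hnd : (PySem.Str.strip s == "$$") = false := beq_eq_false_iff_ne.mpr h2
          have hstep' : pvStepA (b, c) s = (b, c) := by
            rw [hstep, if_neg h0, if_neg h1, if_neg h2]
          rw [hstep', ih]
          simp [h1, hnd]

-- ===== VERDICT (by name: the statement is the Claim_ definition above) =====
theorem count_display_math_blocks_py_spec : Claim_equal_count_display_math_blocks_py := by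
  unfold Claim_equal_count_display_math_blocks_py
  intro md _
  unfold Spec_count_display_math_blocks_py count_display_math_blocks_py count_display_math_blocks_py_alt
  simp only []
  rw [pv_loopA, pv_floordiv_two]
  simp
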